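-- pv_equiv track=rewrite | github.com/yanshg/algorithms | misc/parenthese_remove_invalid.py | remove_invalid_parentheses_stack
-- ===== SOURCE A (Python) =====
-- def remove_invalid_parentheses_stack(s):
--     # go through each char,
--     # if '(' then push index into stack
--     # if ')', then
--     #    if stack not empty, pop
--     #    if stack empty, the current ')' is invalid, remove it with s[index] =''
--     #
--     # after all chars finished,
--     # if still stack not empty, set s[all index in stack] to ''
--
--     sl = list(s)
--     stack = []
--     for i, c in enumerate(sl):
--         if c == '(':
--             stack.append(i)
--         elif c == ')':
--             if not stack:
--                 sl[i] = ''
--             else: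
--                 stack.pop()
--
--     for i in stack:
--         sl[i] = ''
--
--     return ''.join(sl)
-- ===== SOURCE B (Python) =====
-- def remove_invalid_parentheses_stack(s):
--     # pass 1: left-to-right, drop ')' that have no open '(' before them
--     res = []
--     open_cnt = 0
--     for c in s:
--         if c == '(':
--             open_cnt += 1
--             res.append(c)
--         elif c == ')':
--             if open_cnt > 0:
--                 open_cnt -= 1
--                 res.append(c)
--         else:
--             res.append(c)
--     # pass 2: right-to-left, drop '(' that have no ')' after them
--     out = []
--     close_cnt = 0
--     for c in reversed(res):
--         if c == ')':
--             close_cnt += 1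
--             out.append(c)
--         elif c == '(':
--             if close_cnt > 0:
--                 close_cnt -= 1
--                 out.append(c)
--         else:
--             out.append(c)
--     return ''.join(reversed(out))
-- ===== Notes on version B (the rewrite author's own statement) =====
-- stated objective: alternative
-- what changed: A records open-paren indices on a stack and blanks invalid characters in place in a char list; B never touches indices: a left-to-right pass with an open counter drops unmatched close-parens, then a right-to-left pass with a close counter drops unmatched open-parens.
import Mathlib
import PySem

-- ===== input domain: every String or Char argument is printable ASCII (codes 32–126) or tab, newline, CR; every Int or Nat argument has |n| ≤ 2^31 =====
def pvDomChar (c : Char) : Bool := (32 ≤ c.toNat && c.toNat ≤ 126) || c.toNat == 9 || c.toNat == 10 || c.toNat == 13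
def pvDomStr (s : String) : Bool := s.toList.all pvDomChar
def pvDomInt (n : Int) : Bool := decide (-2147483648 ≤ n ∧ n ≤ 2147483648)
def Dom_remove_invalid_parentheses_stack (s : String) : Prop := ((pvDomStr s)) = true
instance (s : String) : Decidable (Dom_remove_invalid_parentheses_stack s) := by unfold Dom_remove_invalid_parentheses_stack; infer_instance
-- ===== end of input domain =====

-- B replaces A's index-stack plus in-place blanking with a two-pass directional-counter scan (alternative algorithm, same cost class).


-- ===== PORT A =====
-- one step of A's first loop: state (sl, stack), element (i, c)
def aStep (p : List String × List Int) (ic : Int × String) : List String × List Int :=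
  if ic.2 = "(" then (p.1, p.2 ++ [ic.1])
  else if ic.2 = ")" then
    if p.2 = [] then (PySem.List.pySetD p.1 ic.1 "", p.2)
    else (p.1, p.2.dropLast)
  else p

def remove_invalid_parentheses_stack (s : String) : String :=
  let sl0 : List String := s.toList.map (fun c => String.ofList [c])
  let st := (PySem.List.enumerate sl0).foldl aStep (sl0, ([] : List Int))
  let sl := st.2.foldl (fun l i => PySem.List.pySetD l i "") st.1
  PySem.Str.join "" sl

-- ===== PORT B =====
-- pass 1 step: drop ')' with no open '(' to its left
def bStep1 (st : Int × List Char) (c : Char) : Int × List Char :=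
  if c = '(' then (st.1 + 1, st.2 ++ [c])
  else if c = ')' then (if st.1 > 0 then (st.1 - 1, st.2 ++ [c]) else st)
  else (st.1, st.2 ++ [c])

-- pass 2 step (input reversed): drop '(' with no ')' to its right
def bStep2 (st : Int × List Char) (c : Char) : Int × List Char :=
  if c = ')' then (st.1 + 1, st.2 ++ [c])
  else if c = '(' then (if st.1 > 0 then (st.1 - 1, st.2 ++ [c]) else st)
  else (st.1, st.2 ++ [c])

def remove_invalid_parentheses_stack_alt (s : String) : String :=
  let res := (s.toList.foldl bStep1 (0, ([] : List Char))).2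
  let out := (res.reverse.foldl bStep2 (0, ([] : List Char))).2
  String.ofList out.reverse

-- ===== PRECONDITION & SPEC =====
def Spec_remove_invalid_parentheses_stack (s : String) (out : String) : Prop := out = remove_invalid_parentheses_stack_alt s
instance (s : String) (out : String) : Decidable (Spec_remove_invalid_parentheses_stack s out) := by unfold Spec_remove_invalid_parentheses_stack; infer_instance

-- ===== CLAIM (what is proved, stated in full; the proofs are below) =====
def Claim_equal_remove_invalid_parentheses_stack : Prop := ∀ (s : String), Dom_remove_invalid_parentheses_stack s → Spec_remove_invalid_parentheses_stack s (remove_invalid_parentheses_stack s)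

-- ===== LEMMAS AND PROOFS =====

-- ---- abstract machines ----

-- char-level segment machine: state (segs, cur); segs = text after each currently-unmatched '(' (newest first)
def chRun : List Char → List (List Char) × List Char → List (List Char) × List Char
  | [], st => st
  | c :: r, (segs, cur) =>
    if c = '(' then chRun r (cur :: segs, [])
    else if c = ')' then
      match segs with
      | [] => chRun r ([], cur)
      | g :: gs => chRun r (gs, g ++ '(' :: cur ++ [')'])
    else chRun r (segs, cur ++ [c])

-- render with '(' separators kept / dropped
def Gk : List (List Char) → List Char
  | [] => []
  | s :: ss => Gk ss ++ s ++ ['(']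

def Gd : List (List Char) → List Char
  | [] => []
  | s :: ss => Gd ss ++ s

-- string-entry machine mirroring A's list-of-strings with "" blanks
def sRun : List String → List (List String) × List String → List (List String) × List String
  | [], st => st
  | e :: r, (segs, cur) =>
    if e = "(" then sRun r (cur :: segs, [])
    else if e = ")" then
      match segs with
      | [] => sRun r ([], cur ++ [""])
      | g :: gs => sRun r (gs, g ++ "(" :: cur ++ [")"])
    else sRun r (segs, cur ++ [e])

def GSk : List (List String) → List String
  | [] => []
  | s :: ss => GSk ss ++ s ++ ["("]

def GSd : List (List String) → List String
  | [] => []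
  | s :: ss => GSd ss ++ s ++ [""]

-- A's stack (oldest first): indices of the '(' separators in GSk
def stk : List (List String) → List Int
  | [] => []
  | s :: ss => stk ss ++ [((GSk ss).length + s.length : Int)]

def flatE (es : List String) : List Char := (es.map String.toList).flatten

-- balanced strings (parentheses fully matched)
inductive Bal : List Char → Prop
  | nil : Bal []
  | other (c : Char) (l : List Char) : c ≠ '(' → c ≠ ')' → Bal l → Bal (c :: l)
  | wrap (a b : List Char) : Bal a → Bal b → Bal ('(' :: a ++ ')' :: b)

-- B's passes as plain recursions
def p1 : Int → List Char → List Char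
  | _, [] => []
  | o, c :: r =>
    if c = '(' then '(' :: p1 (o + 1) r
    else if c = ')' then (if o > 0 then ')' :: p1 (o - 1) r else p1 o r)
    else c :: p1 o r

def o1 : Int → List Char → Int
  | o, [] => o
  | o, c :: r =>
    if c = '(' then o1 (o + 1) r
    else if c = ')' then (if o > 0 then o1 (o - 1) r else o1 o r)
    else o1 o r

def p2 : Int → List Char → List Char
  | _, [] => []
  | o, c :: r =>
    if c = ')' then ')' :: p2 (o + 1) r
    else if c = '(' then (if o > 0 then '(' :: p2 (o - 1) r else p2 o r)
    else c :: p2 o r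

def o2 : Int → List Char → Int
  | o, [] => o
  | o, c :: r =>
    if c = ')' then o2 (o + 1) r
    else if c = '(' then (if o > 0 then o2 (o - 1) r else o2 o r)
    else o2 o r

-- ---- small helpers ----

lemma join_nil_flatten (pss : List (List Char)) : PySem.Chars.join [] pss = pss.flatten := by
  induction pss with
  | nil => rfl
  | cons p ps ih =>
    cases ps with
    | nil => simp [PySem.Chars.join, List.intercalate]
    | cons q qs => rw [PySem.Chars.join_cons_cons, ih]; simp

lemma set_mid (a b : List String) (x v : String) : (a ++ x :: b).set a.length v = a ++ v :: b := by
  simp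

lemma len_GSd_eq (ss : List (List String)) : (GSd ss).length = (GSk ss).length := by
  induction ss with
  | nil => rfl
  | cons s ss ih => simp [GSd, GSk, ih]

-- ---- phase 1 of A = string machine ----

lemma phase1 (rest : List String) : ∀ (segs : List (List String)) (cur : List String),
    (PySem.List.enumerate rest ((GSk segs ++ cur).length : Int)).foldl aStep (GSk segs ++ cur ++ rest, stk segs)
      = (GSk (sRun rest (segs, cur)).1 ++ (sRun rest (segs, cur)).2, stk (sRun rest (segs, cur)).1) := by
  induction rest with
  | nil => intro segs cur; simp [sRun, PySem.List.enumerate]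
  | cons e r ih =>
    intro segs cur
    rw [PySem.List.enumerate_cons, List.foldl_cons]
    by_cases h1 : e = "("
    · have hstep : aStep (GSk segs ++ cur ++ e :: r, stk segs) (((GSk segs ++ cur).length : Int), e)
          = (GSk segs ++ cur ++ e :: r, stk segs ++ [((GSk segs ++ cur).length : Int)]) := by
        simp [aStep, h1]
      rw [hstep]
      have e1 : GSk segs ++ cur ++ e :: r = GSk (cur :: segs) ++ [] ++ r := by simp [GSk, h1]
      have e2 : stk segs ++ [((GSk segs ++ cur).length : Int)] = stk (cur :: segs) := by
        simp [stk]
      have e3 : ((GSk segs ++ cur).length : Int) + 1 = ((GSk (cur :: segs) ++ ([] : List String)).length : Int) := by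
        simp [GSk]; push_cast; ring
      rw [e1, e2, e3, ih (cur :: segs) []]
      simp [sRun, h1]
    · by_cases h2 : e = ")"
      · cases segs with
        | nil =>
          subst h2
          have hset : ((cur ++ ")" :: r).set cur.length "") = GSk [] ++ (cur ++ [""]) ++ r := by
            rw [set_mid cur r ")" ""]
            simp [GSk]
          have hstep : aStep (GSk [] ++ cur ++ ")" :: r, stk []) (((GSk [] ++ cur).length : Int), ")")
              = (GSk [] ++ (cur ++ [""]) ++ r, stk []) := by
            simp [aStep, stk, GSk, hset]
          rw [hstep]
          have e3 : ((GSk [] ++ cur).length : Int) + 1 = ((GSk [] ++ (cur ++ [""])).length : Int) := by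
            simp [GSk]
          rw [e3, ih [] (cur ++ [""])]
          simp [sRun]
        | cons g gs =>
          have hne : stk (g :: gs) ≠ [] := by simp [stk]
          have hstep : aStep (GSk (g :: gs) ++ cur ++ e :: r, stk (g :: gs)) (((GSk (g :: gs) ++ cur).length : Int), e)
              = (GSk (g :: gs) ++ cur ++ e :: r, stk gs) := by
            simp [aStep, h2, stk]
          rw [hstep]
          have e1 : GSk (g :: gs) ++ cur ++ e :: r = GSk gs ++ (g ++ "(" :: cur ++ [")"]) ++ r := by
            simp [GSk, h2]
          have e3 : ((GSk (g :: gs) ++ cur).length : Int) + 1 = ((GSk gs ++ (g ++ "(" :: cur ++ [")"])).length : Int) := by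
            simp [GSk]; push_cast; ring
          rw [e1, e3, ih gs (g ++ "(" :: cur ++ [")"])]
          simp [sRun, h2]
      · have hstep : aStep (GSk segs ++ cur ++ e :: r, stk segs) (((GSk segs ++ cur).length : Int), e)
            = (GSk segs ++ cur ++ e :: r, stk segs) := by
          simp [aStep, h1, h2]
        rw [hstep]
        have e1 : GSk segs ++ cur ++ e :: r = GSk segs ++ (cur ++ [e]) ++ r := by simp
        have e3 : ((GSk segs ++ cur).length : Int) + 1 = ((GSk segs ++ (cur ++ [e])).length : Int) := by
          push_cast [List.length_append, List.length_cons, List.length_nil]; omega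
        rw [e1, e3, ih segs (cur ++ [e])]
        simp [sRun, h1, h2]

-- ---- phase 2 of A: blanking the leftover stack indices ----

lemma phase2 (segs : List (List String)) : ∀ (cur : List String),
    (stk segs).foldl (fun l i => PySem.List.pySetD l i "") (GSk segs ++ cur) = GSd segs ++ cur := by
  induction segs with
  | nil => intro cur; simp [stk, GSk, GSd]
  | cons s ss ih =>
    intro cur
    have e1 : GSk (s :: ss) ++ cur = GSk ss ++ (s ++ "(" :: cur) := by simp [GSk]
    rw [stk, List.foldl_append, e1, ih (s ++ "(" :: cur)]
    have e2 : ((GSk ss).length + s.length : Int) = (((GSd ss ++ s).length : Nat) : Int) := by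
      push_cast [List.length_append, len_GSd_eq]; ring
    have e3 : GSd ss ++ (s ++ "(" :: cur) = (GSd ss ++ s) ++ "(" :: cur := by simp
    simp only [List.foldl_cons, List.foldl_nil, e2, e3, PySem.List.pySetD_natCast]
    rw [set_mid]
    simp [GSd]

-- ---- string machine ↔ char machine ----

lemma runBridge (cs : List Char) : ∀ (segs : List (List String)) (cur : List String),
    chRun cs (segs.map flatE, flatE cur)
      = ((sRun (cs.map (fun c => String.ofList [c])) (segs, cur)).1.map flatE,
         flatE (sRun (cs.map (fun c => String.ofList [c])) (segs, cur)).2) := by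
  induction cs with
  | nil => intro segs cur; simp [chRun, sRun]
  | cons c r ih =>
    intro segs cur
    by_cases h1 : c = '('
    · have h1' : String.ofList [c] = "(" := by rw [h1]
      simp only [List.map_cons, chRun, sRun, h1, if_true]
      have := ih (cur :: segs) []
      simpa [flatE] using this
    · have h1' : ¬ String.ofList [c] = "(" := by
        intro hc; apply h1
        have := congrArg String.toList hc
        simpa [String.toList_ofList] using this
      by_cases h2 : c = ')'
      · have h2' : String.ofList [c] = ")" := by rw [h2]
        cases segs with
        | nil =>
          simp only [List.map_cons, chRun, sRun, h1', h2, if_true, List.map_nil]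
          have := ih [] (cur ++ [""])
          simpa [flatE] using this
        | cons g gs =>
          simp only [List.map_cons, chRun, sRun, h1', h2, if_true]
          have := ih gs (g ++ "(" :: cur ++ [")"])
          simpa [flatE] using this
      · have h2' : ¬ String.ofList [c] = ")" := by
          intro hc; apply h2
          have := congrArg String.toList hc
          simpa [String.toList_ofList] using this
        simp only [List.map_cons, chRun, sRun, h1, h1', h2, h2', if_false]
        have := ih segs (cur ++ [String.ofList [c]])
        simpa [flatE, String.toList_ofList] using this

lemma flatE_GSd (ss : List (List String)) : flatE (GSd ss) = Gd (ss.map flatE) := by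
  induction ss with
  | nil => simp [GSd, Gd, flatE]
  | cons s ss ih => simp [GSd, Gd, flatE]; simp [flatE] at ih; simp [ih]

-- ---- B's pass 1 = char machine rendered with separators ----

lemma p1_run (cs : List Char) : ∀ (segs : List (List Char)) (cur : List Char),
    Gk segs ++ cur ++ p1 (segs.length : Int) cs
      = Gk (chRun cs (segs, cur)).1 ++ (chRun cs (segs, cur)).2 := by
  induction cs with
  | nil => intro segs cur; simp [chRun, p1]
  | cons c r ih =>
    intro segs cur
    by_cases h1 : c = '('
    · have h := ih (cur :: segs) []
      have hlen : (segs.length : Int) + 1 = ((cur :: segs).length : Int) := by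
        push_cast [List.length_cons]; ring
      simp only [chRun, p1, h1, if_true]
      rw [hlen]
      simpa [Gk] using h
    · by_cases h2 : c = ')'
      · cases segs with
        | nil =>
          have h := ih [] cur
          simp only [chRun, p1, h2, if_true]
          simpa using h
        | cons g gs =>
          have h := ih gs (g ++ '(' :: cur ++ [')'])
          have hpos : ((g :: gs).length : Int) > 0 := by
            push_cast [List.length_cons]; omega
          have hdec : ((g :: gs).length : Int) - 1 = (gs.length : Int) := by
            push_cast [List.length_cons]; ring
          simp only [chRun, p1, h2, if_true, if_pos hpos, hdec]
          simpa [Gk] using h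
      · have h := ih segs (cur ++ [c])
        simp only [chRun, p1, h1, h2, if_false]
        simpa using h

-- ---- balance invariant ----

lemma bal_append {a b : List Char} (ha : Bal a) (hb : Bal b) : Bal (a ++ b) := by
  induction ha with
  | nil => simpa using hb
  | other c l h1 h2 _ ih => exact Bal.other c _ h1 h2 ih
  | wrap x y hx _ ihx ihy =>
    have := Bal.wrap x (y ++ b) hx ihy
    simpa using this

lemma run_bal (cs : List Char) : ∀ (segs : List (List Char)) (cur : List Char),
    (∀ g ∈ segs, Bal g) → Bal cur →
    (∀ g ∈ (chRun cs (segs, cur)).1, Bal g) ∧ Bal (chRun cs (segs, cur)).2 := by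
  induction cs with
  | nil => intro segs cur hs hc; simpa [chRun] using ⟨hs, hc⟩
  | cons c r ih =>
    intro segs cur hs hc
    by_cases h1 : c = '('
    · simp only [chRun, h1, if_true]
      refine ih (cur :: segs) [] ?_ Bal.nil
      intro g hg
      rcases List.mem_cons.mp hg with h | h
      · exact h ▸ hc
      · exact hs g h
    · by_cases h2 : c = ')'
      · cases segs with
        | nil =>
          simp only [chRun, h2, if_true]
          exact ih [] cur (by simp) hc
        | cons g gs =>
          simp only [chRun, h2, if_true]
          refine ih gs (g ++ '(' :: cur ++ [')']) (fun x hx => hs x (List.mem_cons_of_mem _ hx)) ?_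
          have hg : Bal g := hs g List.mem_cons_self
          have hw : Bal ('(' :: cur ++ ')' :: []) := Bal.wrap cur [] hc Bal.nil
          have := bal_append hg hw
          simpa using this
      · simp only [chRun, h1, h2, if_false]
        exact ih segs (cur ++ [c]) hs (bal_append hc (Bal.other c [] h1 h2 Bal.nil))

-- ---- B's pass 2 ----

lemma p2_bal {b : List Char} (hb : Bal b) : ∀ (o : Int) (r : List Char), 0 ≤ o →
    p2 o (b.reverse ++ r) = b.reverse ++ p2 o r := by
  induction hb with
  | nil => intro o r ho; simp
  | other c l h1 h2 _ ih =>
    intro o r ho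
    have : (c :: l).reverse ++ r = l.reverse ++ (c :: r) := by simp
    rw [this, ih o (c :: r) ho]
    simp only [p2, h1, h2, if_false]
    simp
  | wrap a b _ _ iha ihb =>
    intro o r ho
    have e1 : ('(' :: a ++ ')' :: b).reverse ++ r = b.reverse ++ (')' :: (a.reverse ++ ('(' :: r))) := by
      simp
    rw [e1, ihb o _ ho]
    simp only [p2, if_true]
    rw [iha (o + 1) _ (by omega)]
    have hpos : (o : Int) + 1 > 0 := by omega
    have hoo : (o : Int) + 1 - 1 = o := by ring
    have h2 : p2 (o + 1) ('(' :: r) = '(' :: p2 o r := by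
      simp [p2, hpos, hoo]
    rw [h2]
    simp

lemma p2_Gk (segs : List (List Char)) (h : ∀ g ∈ segs, Bal g) :
    p2 0 (Gk segs).reverse = (Gd segs).reverse := by
  induction segs with
  | nil => simp [Gk, Gd, p2]
  | cons s ss ih =>
    have hs : Bal s := h s List.mem_cons_self
    have hss : ∀ g ∈ ss, Bal g := fun g hg => h g (List.mem_cons_of_mem _ hg)
    have e1 : (Gk (s :: ss)).reverse = '(' :: (s.reverse ++ (Gk ss).reverse) := by simp [Gk]
    rw [e1]
    have : p2 0 ('(' :: (s.reverse ++ (Gk ss).reverse)) = p2 0 (s.reverse ++ (Gk ss).reverse) := by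
      simp [p2]
    rw [this, p2_bal hs 0 _ (by omega), ih hss]
    simp [Gd]

-- ---- B's foldl loops = p1/p2 recursions ----

lemma foldl_bStep1 (cs : List Char) : ∀ (o : Int) (acc : List Char),
    cs.foldl bStep1 (o, acc) = (o1 o cs, acc ++ p1 o cs) := by
  induction cs with
  | nil => intro o acc; simp [o1, p1]
  | cons c r ih =>
    intro o acc
    by_cases h1 : c = '('
    · simp [bStep1, p1, o1, h1, ih]
    · by_cases h2 : c = ')'
      · by_cases h3 : o > 0 <;> simp [bStep1, p1, o1, h2, h3, ih]
      · simp [bStep1, p1, o1, h1, h2, ih]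

lemma foldl_bStep2 (cs : List Char) : ∀ (o : Int) (acc : List Char),
    cs.foldl bStep2 (o, acc) = (o2 o cs, acc ++ p2 o cs) := by
  induction cs with
  | nil => intro o acc; simp [o2, p2]
  | cons c r ih =>
    intro o acc
    by_cases h1 : c = ')'
    · simp [bStep2, p2, o2, h1, ih]
    · by_cases h2 : c = '('
      · by_cases h3 : o > 0 <;> simp [bStep2, p2, o2, h2, h3, ih]
      · simp [bStep2, p2, o2, h1, h2, ih]

-- ===== VERDICT (by name: the statement is the Claim_ definition above) =====
theorem remove_invalid_parentheses_stack_spec : Claim_equal_remove_invalid_parentheses_stack := by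
  intro s _
  unfold Spec_remove_invalid_parentheses_stack
  refine (String.toList_inj.mp ?_).symm
  unfold remove_invalid_parentheses_stack remove_invalid_parentheses_stack_alt
  simp only []
  set cs := s.toList with hcs
  set sl0 := cs.map (fun c => String.ofList [c]) with hsl0
  -- A side: phase 1
  have hA1 := phase1 sl0 [] []
  simp only [GSk, stk, List.nil_append, List.length_nil, Nat.cast_zero] at hA1
  set S := (sRun sl0 ([], [])).1 with hS
  set C := (sRun sl0 ([], [])).2 with hC
  -- A side: phase 2
  have hA2 := phase2 S C
  -- bridge to the char machine
  have hBr := runBridge cs [] []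
  have hfe : flatE ([] : List String) = [] := by simp [flatE]
  simp only [List.map_nil, hfe] at hBr
  rw [← hsl0, ← hS, ← hC] at hBr
  set CS := (chRun cs ([], [])).1 with hCS
  set CC := (chRun cs ([], [])).2 with hCC
  have hCSe : CS = S.map flatE := by rw [hCS, hBr]
  have hCCe : CC = flatE C := by rw [hCC, hBr]
  -- B side: pass 1 = Gk-rendering of the char machine
  have hp1 := p1_run cs [] []
  simp only [Gk, List.nil_append, List.length_nil, Nat.cast_zero, ← hCS, ← hCC] at hp1
  -- balance invariant
  have hbal := run_bal cs [] [] (by simp) Bal.nil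
  rw [← hCS, ← hCC] at hbal
  -- B side: pass 2
  have hp2 : p2 0 (Gk CS ++ CC).reverse = (Gd CS ++ CC).reverse := by
    have h1 : (Gk CS ++ CC).reverse = CC.reverse ++ (Gk CS).reverse := by simp
    rw [h1, p2_bal hbal.2 0 _ (by omega), p2_Gk CS hbal.1]
    simp
  -- compute both toLists
  rw [hA1, hA2, foldl_bStep1]
  simp only [List.nil_append]
  rw [foldl_bStep2]
  simp only [List.nil_append, String.toList_ofList]
  rw [hp1, hp2]
  simp only [List.reverse_reverse]
  -- A's join
  have hjoin : (PySem.Str.join "" (GSd S ++ C)).toList = flatE (GSd S) ++ flatE C := by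
    simp [pysem, join_nil_flatten, flatE]
  rw [hjoin, flatE_GSd, ← hCSe, ← hCCe]
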